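-- pv_equiv track=rewrite | github.com/rajectedguy/GeeksforGeeksPOTD | 2026_GFG_POTD/JANUARY/14-01-2026/Police and Thieves.py | catchThieves
-- ===== SOURCE A (Python) =====
-- def catchThieves(arr, k):
--     police = []
--     thieves = []
--     n = len(arr)
--     caught = 0
--
--     for i in range(n):
--         if arr[i] == 'P':
--             police.append(i)
--         elif arr[i] == 'T':
--             thieves.append(i)
--
--     i = j = 0
--     while i < len(police) and j < len(thieves):
--         if abs(police[i] - thieves[j]) <= k:
--             caught += 1
--             i += 1
--             j += 1
--         elif police[i] < thieves[j]:
--             i += 1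
--         else:
--             j += 1
--
--     return caught
-- ===== SOURCE B (Python) =====
-- def catchThieves(arr, k):
--     # Single online sweep: one queue of unmatched indices, all of one kind.
--     pending = []
--     kind = ''
--     caught = 0
--     for i, c in enumerate(arr):
--         if c != 'P' and c != 'T':
--             continue
--         if pending and kind != c:
--             while pending and i - pending[0] > k:
--                 del pending[0]
--             if pending:
--                 del pending[0]
--                 caught += 1
--                 continue
--         pending.append(i)
--         kind = c
--     return caught
-- ===== Notes on version B (the rewrite author's own statement) =====
-- stated objective: alternative
-- what changed: Replaces A's collect-into-two-lists-then-two-pointer-merge with a single online sweep over enumerate(arr) maintaining one queue of unmatched indices (all of one kind) that is evicted/matched greedily as indices arrive.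
import Mathlib
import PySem

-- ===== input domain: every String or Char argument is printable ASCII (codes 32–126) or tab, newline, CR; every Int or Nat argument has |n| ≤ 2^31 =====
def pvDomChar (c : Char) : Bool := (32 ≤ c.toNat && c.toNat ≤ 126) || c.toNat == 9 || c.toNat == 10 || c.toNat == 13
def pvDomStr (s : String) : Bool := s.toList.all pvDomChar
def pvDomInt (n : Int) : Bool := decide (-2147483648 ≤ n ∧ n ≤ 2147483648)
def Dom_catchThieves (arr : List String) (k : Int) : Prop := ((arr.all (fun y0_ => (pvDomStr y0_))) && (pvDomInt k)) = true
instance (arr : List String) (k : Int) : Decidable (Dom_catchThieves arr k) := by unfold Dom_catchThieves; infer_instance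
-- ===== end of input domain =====

-- B replaces A's collect-then-two-pointer-merge with a single online sweep keeping one
-- queue of unmatched indices; same cost, different algorithm (objective: alternative).

-- ===== PORT A =====
-- A's while loop over the two collected index lists, with the running `caught` accumulator.
def twoPtrA (k : Int) : List Int → List Int → Int → Int
  | p :: ps, t :: ts, caught =>
      if |p - t| ≤ k then twoPtrA k ps ts (caught + 1)
      else if p < t then twoPtrA k ps (t :: ts) caught
      else twoPtrA k (p :: ps) ts caught
  | _, _, caught => caught
termination_by p t _ => p.length + t.length

def catchThieves (arr : List String) (k : Int) : Int :=
  let pt := (PySem.List.enumerate arr 0).foldl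
    (fun (s : List Int × List Int) (p : Int × String) =>
      if p.2 = "P" then (s.1 ++ [p.1], s.2)
      else if p.2 = "T" then (s.1, s.2 ++ [p.1]) else s) ([], [])
  twoPtrA k pt.1 pt.2 0

-- ===== PORT B =====
-- state = (pending queue, kind of its entries, caught); dropWhile ports the while/del front-eviction loop.
def stepB (k : Int) (s : List Int × String × Int) (p : Int × String) : List Int × String × Int :=
  if p.2 ≠ "P" ∧ p.2 ≠ "T" then s
  else if s.1 ≠ [] ∧ s.2.1 ≠ p.2 then
    match s.1.dropWhile (fun t => decide (p.1 - t > k)) with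
    | _ :: rest => (rest, s.2.1, s.2.2 + 1)
    | [] => ([p.1], p.2, s.2.2)
  else (s.1 ++ [p.1], p.2, s.2.2)

def catchThieves_alt (arr : List String) (k : Int) : Int :=
  ((PySem.List.enumerate arr 0).foldl (stepB k) ([], "", 0)).2.2

-- ===== PRECONDITION & SPEC =====
def Spec_catchThieves (arr : List String) (k : Int) (out : Int) : Prop := out = catchThieves_alt arr k
instance (arr : List String) (k : Int) (out : Int) : Decidable (Spec_catchThieves arr k out) := by unfold Spec_catchThieves; infer_instance

-- ===== CLAIM (what is proved, stated in full; the proofs are below) =====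
def Claim_equal_catchThieves : Prop := ∀ (arr : List String) (k : Int), Dom_catchThieves arr k → Spec_catchThieves arr k (catchThieves arr k)

-- ===== LEMMAS AND PROOFS =====

def polOf (l : List (Int × String)) : List Int :=
  l.foldr (fun p acc => if p.2 = "P" then p.1 :: acc else acc) []

def thiOf (l : List (Int × String)) : List Int :=
  l.foldr (fun p acc => if p.2 = "T" then p.1 :: acc else acc) []

lemma collect_eq (l : List (Int × String)) : ∀ (p t : List Int),
    l.foldl (fun (s : List Int × List Int) (p : Int × String) =>
      if p.2 = "P" then (s.1 ++ [p.1], s.2)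
      else if p.2 = "T" then (s.1, s.2 ++ [p.1]) else s) (p, t)
    = (p ++ polOf l, t ++ thiOf l) := by
  induction l with
  | nil => intro p t; simp [polOf, thiOf]
  | cons hd tl ih =>
    intro p t
    by_cases hP : hd.2 = "P"
    · simp [polOf, thiOf, hP, ih]
    · by_cases hT : hd.2 = "T" <;> simp [polOf, thiOf, hP, hT, ih]

lemma twoPtr_nil_left (k : Int) (t : List Int) (c : Int) : twoPtrA k [] t c = c := by
  cases t <;> simp [twoPtrA]

lemma twoPtr_nil_right (k : Int) (p : List Int) (c : Int) : twoPtrA k p [] c = c := by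
  cases p <;> simp [twoPtrA]

lemma evictT (k i : Int) (X Y : List Int) (c : Int) : ∀ (pend : List Int),
    (∀ t ∈ pend, t < i) →
    twoPtrA k (i :: X) (pend ++ Y) c
      = twoPtrA k (i :: X) (pend.dropWhile (fun t => decide (i - t > k)) ++ Y) c := by
  intro pend
  induction pend with
  | nil => intro _; rfl
  | cons t rest ih =>
    intro h
    have ht : t < i := h t (by simp)
    by_cases hk : i - t > k
    · rw [List.dropWhile_cons_of_pos (by simpa using hk)]
      rw [show (t :: rest) ++ Y = t :: (rest ++ Y) from rfl]
      rw [twoPtrA]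
      rw [if_neg (by rw [abs_of_pos (by omega)]; omega), if_neg (by omega)]
      exact ih (fun x hx => h x (by simp [hx]))
    · rw [List.dropWhile_cons_of_neg (by simpa using hk)]

lemma evictP (k i : Int) (X Y : List Int) (c : Int) : ∀ (pend : List Int),
    (∀ t ∈ pend, t < i) →
    twoPtrA k (pend ++ X) (i :: Y) c
      = twoPtrA k (pend.dropWhile (fun t => decide (i - t > k)) ++ X) (i :: Y) c := by
  intro pend
  induction pend with
  | nil => intro _; rfl
  | cons t rest ih =>
    intro h
    have ht : t < i := h t (by simp)
    by_cases hk : i - t > k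
    · rw [List.dropWhile_cons_of_pos (by simpa using hk)]
      rw [show (t :: rest) ++ X = t :: (rest ++ X) from rfl]
      rw [twoPtrA]
      rw [if_neg (by rw [abs_of_neg (by omega)]; omega), if_pos (by omega)]
      exact ih (fun x hx => h x (by simp [hx]))
    · rw [List.dropWhile_cons_of_neg (by simpa using hk)]

lemma dropWhile_cons_head {p : Int → Bool} {l : List Int} {x : Int} {r : List Int}
    (h : l.dropWhile p = x :: r) : p x = false := by
  induction l with
  | nil => simp at h
  | cons a tl ih =>
    by_cases ha : p a
    · rw [List.dropWhile_cons_of_pos ha] at h; exact ih h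
    · rw [List.dropWhile_cons_of_neg ha] at h
      cases h; simpa using ha

lemma foldB (k : Int) : ∀ (l : List (Int × String)) (pend : List Int) (kind : String) (c : Int),
    (∀ p ∈ l, ∀ t ∈ pend, t < p.1) →
    l.Pairwise (fun a b => a.1 < b.1) →
    (pend ≠ [] → kind = "P" ∨ kind = "T") →
    (l.foldl (stepB k) (pend, kind, c)).2.2
      = twoPtrA k ((if kind = "P" then pend else []) ++ polOf l)
                  ((if kind = "T" then pend else []) ++ thiOf l) c := by
  intro l
  induction l with
  | nil =>
    intro pend kind c _ _ hk
    by_cases hkd : pend = []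
    · subst hkd; simp [polOf, thiOf, twoPtr_nil_left]
    · rcases hk hkd with h | h <;>
        simp [polOf, thiOf, h, twoPtr_nil_left, twoPtr_nil_right]
  | cons hd tl ih =>
    intro pend kind c hlt hpw hk
    obtain ⟨i, s⟩ := hd
    have hpwtl := (List.pairwise_cons.mp hpw).2
    have hlthd : ∀ t ∈ pend, t < i := fun t ht => hlt (i, s) (by simp) t ht
    by_cases hP : s = "P"
    · subst hP
      rw [List.foldl_cons]
      by_cases hbr : pend ≠ [] ∧ kind ≠ "P"
      · -- eviction / match branch; pend are thieves
        have hkT : kind = "T" := by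
          rcases hk hbr.1 with h | h
          · exact absurd h hbr.2
          · exact h
        subst hkT
        have hRHS : twoPtrA k ((if ("T" : String) = "P" then pend else []) ++ polOf ((i, "P") :: tl))
              ((if ("T" : String) = "T" then pend else []) ++ thiOf ((i, "P") :: tl)) c
            = twoPtrA k (i :: polOf tl) (pend.dropWhile (fun t => decide (i - t > k)) ++ thiOf tl) c := by
          have e1 : polOf ((i, "P") :: tl) = i :: polOf tl := by simp [polOf]
          have e2 : thiOf ((i, "P") :: tl) = thiOf tl := by simp [thiOf]
          rw [e1, e2, if_neg (by decide), if_pos rfl, List.nil_append]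
          exact evictT k i (polOf tl) (thiOf tl) c pend hlthd
        cases hdw : pend.dropWhile (fun t => decide (i - t > k)) with
        | nil =>
          have hstep : stepB k (pend, "T", c) (i, "P") = ([i], "P", c) := by
            simp [stepB, hbr.1, hdw]
          rw [hstep, hRHS, hdw]
          rw [ih [i] "P" c
            (fun p hp t ht => by
              simp at ht; subst ht
              exact (List.pairwise_cons.mp hpw).1 p hp)
            hpwtl (fun _ => Or.inl rfl)]
          simp
        | cons t0 rest =>
          have hstep : stepB k (pend, "T", c) (i, "P") = (rest, "T", c + 1) := by
            simp [stepB, hbr.1, hdw]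
          rw [hstep, hRHS, hdw]
          have ht0mem : t0 ∈ pend := (List.dropWhile_sublist _).subset (by rw [hdw]; simp)
          have ht0 : t0 < i := hlthd t0 ht0mem
          have hnk : ¬ (i - t0 > k) := by simpa using dropWhile_cons_head hdw
          rw [show t0 :: rest ++ thiOf tl = t0 :: (rest ++ thiOf tl) from rfl]
          rw [twoPtrA, if_pos (by rw [abs_of_pos (by omega)]; omega)]
          rw [ih rest "T" (c + 1)
            (fun p hp t ht => hlt p (by simp [hp]) t
              ((List.dropWhile_sublist _).subset (by rw [hdw]; simp [ht])))
            hpwtl (fun _ => Or.inr rfl)]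
          simp
      · -- append branch
        push_neg at hbr
        have hstep : stepB k (pend, kind, c) (i, "P") = (pend ++ [i], "P", c) := by
          rcases Decidable.em (pend = []) with h | h
          · simp [stepB, h]
          · simp [stepB, h, hbr h]
        rw [hstep]
        rw [ih (pend ++ [i]) "P" c
          (fun p hp t ht => by
            rcases List.mem_append.mp ht with h | h
            · exact hlt p (by simp [hp]) t h
            · simp at h; subst h
              exact (List.pairwise_cons.mp hpw).1 p hp)
          hpwtl (fun _ => Or.inl rfl)]
        by_cases hkd : pend = []
        · subst hkd; simp [polOf, thiOf]
        · have hkP : kind = "P" := by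
            by_contra hne
            exact hne (hbr hkd)
          subst hkP
          simp [polOf, thiOf]
    · by_cases hT : s = "T"
      · subst hT
        rw [List.foldl_cons]
        by_cases hbr : pend ≠ [] ∧ kind ≠ "T"
        · have hkP : kind = "P" := by
            rcases hk hbr.1 with h | h
            · exact h
            · exact absurd h hbr.2
          subst hkP
          have hRHS : twoPtrA k ((if ("P" : String) = "P" then pend else []) ++ polOf ((i, "T") :: tl))
                ((if ("P" : String) = "T" then pend else []) ++ thiOf ((i, "T") :: tl)) c
              = twoPtrA k (pend.dropWhile (fun t => decide (i - t > k)) ++ polOf tl) (i :: thiOf tl) c := by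
            have e1 : polOf ((i, "T") :: tl) = polOf tl := by simp [polOf]
            have e2 : thiOf ((i, "T") :: tl) = i :: thiOf tl := by simp [thiOf]
            rw [e1, e2, if_pos rfl, if_neg (by decide), List.nil_append]
            exact evictP k i (polOf tl) (thiOf tl) c pend hlthd
          cases hdw : pend.dropWhile (fun t => decide (i - t > k)) with
          | nil =>
            have hstep : stepB k (pend, "P", c) (i, "T") = ([i], "T", c) := by
              simp [stepB, hbr.1, hdw]
            rw [hstep, hRHS, hdw]
            rw [ih [i] "T" c
              (fun p hp t ht => by
                simp at ht; subst ht
                exact (List.pairwise_cons.mp hpw).1 p hp)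
              hpwtl (fun _ => Or.inr rfl)]
            simp
          | cons t0 rest =>
            have hstep : stepB k (pend, "P", c) (i, "T") = (rest, "P", c + 1) := by
              simp [stepB, hbr.1, hdw]
            rw [hstep, hRHS, hdw]
            have ht0mem : t0 ∈ pend := (List.dropWhile_sublist _).subset (by rw [hdw]; simp)
            have ht0 : t0 < i := hlthd t0 ht0mem
            have hnk : ¬ (i - t0 > k) := by simpa using dropWhile_cons_head hdw
            rw [show t0 :: rest ++ polOf tl = t0 :: (rest ++ polOf tl) from rfl]
            rw [twoPtrA, if_pos (by rw [abs_of_neg (by omega)]; omega)]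
            rw [ih rest "P" (c + 1)
              (fun p hp t ht => hlt p (by simp [hp]) t
                ((List.dropWhile_sublist _).subset (by rw [hdw]; simp [ht])))
              hpwtl (fun _ => Or.inl rfl)]
            simp
        · push_neg at hbr
          have hstep : stepB k (pend, kind, c) (i, "T") = (pend ++ [i], "T", c) := by
            rcases Decidable.em (pend = []) with h | h
            · simp [stepB, h]
            · simp [stepB, h, hbr h]
          rw [hstep]
          rw [ih (pend ++ [i]) "T" c
            (fun p hp t ht => by
              rcases List.mem_append.mp ht with h | h
              · exact hlt p (by simp [hp]) t h
              · simp at h; subst h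
                exact (List.pairwise_cons.mp hpw).1 p hp)
            hpwtl (fun _ => Or.inr rfl)]
          by_cases hkd : pend = []
          · subst hkd; simp [polOf, thiOf]
          · have hkT : kind = "T" := by
              by_contra hne
              exact hne (hbr hkd)
            subst hkT
            simp [polOf, thiOf]
      · -- other character: state unchanged
        rw [List.foldl_cons]
        have hstep : stepB k (pend, kind, c) (i, s) = (pend, kind, c) := by
          simp [stepB, hP, hT]
        rw [hstep]
        rw [ih pend kind c (fun p hp t ht => hlt p (by simp [hp]) t ht) hpwtl hk]
        simp [polOf, thiOf, hP, hT]

-- ===== VERDICT (by name: the statement is the Claim_ definition above) =====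
theorem catchThieves_spec : Claim_equal_catchThieves := by
  intro arr k _
  unfold Spec_catchThieves catchThieves catchThieves_alt
  rw [collect_eq]
  rw [foldB k (PySem.List.enumerate arr 0) [] "" 0
    (by simp) (PySem.List.pairwise_lt_enumerate arr 0) (by simp)]
  simp
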